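-- pv_equiv track=rewrite | github.com/shanayatunk/feelori-ai-whatsapp-assistant | ai_conversation_engine/src/services/sanitizer.py | _prevent_character_spam
-- ===== SOURCE A (Python) =====
-- MAX_CONSECUTIVE_CHARS = 100  # Prevent spam with long strings of repeated characters
--
-- def _prevent_character_spam(message: str) -> str:
--     """
--     Reduces long runs of identical consecutive characters to a max limit.
--
--     Args:
--         message: The input message string.
--
--     Returns:
--         The message with character spam reduced.
--     """
--     if not message:
--         return message
--
--     result = []
--     prev_char = None
--     consecutive_count = 0
--
--     for char in message:
--         if char == prev_char:
--             consecutive_count += 1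
--         else:
--             # Reset counter for a new character
--             consecutive_count = 1
--             prev_char = char
--
--         # Append character only if it's below the consecutive limit
--         if consecutive_count < MAX_CONSECUTIVE_CHARS:
--             result.append(char)
--
--     return ''.join(result)
-- ===== SOURCE B (Python) =====
-- MAX_CONSECUTIVE_CHARS = 100  # Prevent spam with long strings of repeated characters
--
--
-- def _prevent_character_spam(message: str) -> str:
--     """Run-based rewrite: scan each maximal run of equal characters with two
--     indices and keep at most MAX_CONSECUTIVE_CHARS - 1 of it via slicing."""
--     if not message:
--         return message
--
--     pieces = []
--     i = 0
--     n = len(message)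
--     while i < n:
--         j = i + 1
--         while j < n and message[j] == message[i]:
--             j += 1
--         pieces.append(message[i:i + min(j - i, MAX_CONSECUTIVE_CHARS - 1)])
--         i = j
--     return ''.join(pieces)
-- ===== Notes on version B (the rewrite author's own statement) =====
-- stated objective: alternative
-- what changed: B scans maximal runs of equal characters with two indices and appends one capped slice (min(run, 99) chars) per run, instead of A's per-character loop with a consecutive counter and conditional per-character append.
import Mathlib
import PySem

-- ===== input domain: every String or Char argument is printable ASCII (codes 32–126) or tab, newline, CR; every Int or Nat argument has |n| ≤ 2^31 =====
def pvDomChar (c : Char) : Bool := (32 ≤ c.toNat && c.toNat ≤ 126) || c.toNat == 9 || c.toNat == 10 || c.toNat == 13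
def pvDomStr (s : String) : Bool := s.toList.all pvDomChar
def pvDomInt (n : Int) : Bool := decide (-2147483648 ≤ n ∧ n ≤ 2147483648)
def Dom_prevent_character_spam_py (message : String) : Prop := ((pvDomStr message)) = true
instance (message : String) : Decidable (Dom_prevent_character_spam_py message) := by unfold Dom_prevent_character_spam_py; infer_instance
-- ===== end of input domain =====

-- B scans maximal runs of equal characters and emits one capped piece per run; A counts per character. Equal output is proved on the whole domain.

-- ===== PORT A =====
-- the for-loop of A: state (result, prev_char, consecutive_count), one step per character
def pyLoopA : List Char → List Char → Option Char → Nat → List Char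
  | [], result, _, _ => result
  | ch :: rest, result, prev, cnt =>
    if prev = some ch then
      pyLoopA rest (if cnt + 1 < 100 then result ++ [ch] else result) prev (cnt + 1)
    else
      pyLoopA rest (if (1 : Nat) < 100 then result ++ [ch] else result) (some ch) 1

def prevent_character_spam_py (message : String) : String :=
  if message = "" then message
  else String.mk (pyLoopA message.toList [] none 0)

-- ===== PORT B =====
-- inner while loop of B: number of further characters equal to message[i]
def leadB (c : Char) : List Char → Nat
  | [] => 0
  | a :: xs => if a = c then leadB c xs + 1 else 0

-- rest of the string after the current run
def dropLeadB (c : Char) : List Char → List Char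
  | [] => []
  | a :: xs => if a = c then dropLeadB c xs else a :: xs

theorem dropLeadB_length_le (c : Char) : ∀ xs : List Char, (dropLeadB c xs).length ≤ xs.length
  | [] => le_refl _
  | a :: xs => by
    simp only [dropLeadB]
    split
    · exact le_trans (dropLeadB_length_le c xs) (Nat.le_succ _)
    · exact le_refl _

-- outer while loop of B: the maximal runs (char, length), in order
def runsB : List Char → List (Char × Nat)
  | [] => []
  | c :: xs => (c, 1 + leadB c xs) :: runsB (dropLeadB c xs)
  termination_by l => l.length
  decreasing_by exact Nat.lt_succ_of_le (dropLeadB_length_le c xs)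

-- ''.join of the capped slices, one per run
def emitB (l : List Char) : List Char :=
  ((runsB l).map (fun p => List.replicate (min p.2 99) p.1)).flatten

def prevent_character_spam_py_alt (message : String) : String :=
  if message = "" then message
  else String.mk (emitB message.toList)

-- ===== PRECONDITION & SPEC =====
def Spec_prevent_character_spam_py (message : String) (out : String) : Prop := out = prevent_character_spam_py_alt message
instance (message : String) (out : String) : Decidable (Spec_prevent_character_spam_py message out) := by unfold Spec_prevent_character_spam_py; infer_instance

-- ===== CLAIM (what is proved, stated in full; the proofs are below) =====
def Claim_equal_prevent_character_spam_py : Prop := ∀ (message : String), Dom_prevent_character_spam_py message → Spec_prevent_character_spam_py message (prevent_character_spam_py message)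

-- ===== LEMMAS AND PROOFS =====

theorem pyLoopA_acc (xs : List Char) : ∀ (acc : List Char) (p : Option Char) (k : Nat),
    pyLoopA xs acc p k = acc ++ pyLoopA xs [] p k := by
  induction xs with
  | nil => intro acc p k; simp [pyLoopA]
  | cons ch rest ih =>
    intro acc p k
    by_cases hp : p = some ch
    · by_cases hk : k + 1 < 100
      · simp only [pyLoopA, if_pos hp, if_pos hk, List.nil_append]
        rw [ih, ih [ch]]; simp
      · simp only [pyLoopA, if_pos hp, if_neg hk]
        rw [ih]
    · simp only [pyLoopA, if_neg hp, if_pos (by norm_num : (1 : Nat) < 100), List.nil_append]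
      rw [ih, ih [ch]]; simp

theorem emitB_cons (a : Char) (xs : List Char) :
    emitB (a :: xs) = List.replicate (min (1 + leadB a xs) 99) a ++ emitB (dropLeadB a xs) := by
  rw [emitB, runsB]
  simp [emitB]

-- A's loop from state (prev = some c, count = k) emits the rest of the current run capped at 99 - k, then continues run by run
theorem loopA_run (xs : List Char) : ∀ (c : Char) (k : Nat),
    pyLoopA xs [] (some c) k =
      List.replicate (min (leadB c xs) (99 - k)) c ++ emitB (dropLeadB c xs) := by
  induction xs with
  | nil => intro c k; simp [pyLoopA, leadB, dropLeadB, emitB, runsB]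
  | cons a rest ih =>
    intro c k
    by_cases h : a = c
    · subst h
      have hl : leadB a (a :: rest) = leadB a rest + 1 := by simp [leadB]
      have hd : dropLeadB a (a :: rest) = dropLeadB a rest := by simp [dropLeadB]
      simp only [pyLoopA]
      rw [if_pos trivial, pyLoopA_acc, ih a (k + 1), hl, hd]
      have hm : min (leadB a rest + 1) (99 - k)
          = (if k + 1 < 100 then 1 else 0) + min (leadB a rest) (99 - (k + 1)) := by
        split <;> omega
      rw [hm, List.replicate_add]
      split <;> simp [List.replicate]
    · have hne : (some c : Option Char) ≠ some a := fun hc => h (Option.some.inj hc).symm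
      have hl : leadB c (a :: rest) = 0 := by simp [leadB, h]
      have hd : dropLeadB c (a :: rest) = a :: rest := by simp [dropLeadB, h]
      simp only [pyLoopA]
      rw [if_neg hne, if_pos (by norm_num : (1 : Nat) < 100), pyLoopA_acc, ih a 1, hl, hd,
        emitB_cons]
      have hm : min (1 + leadB a rest) 99 = 1 + min (leadB a rest) (99 - 1) := by omega
      rw [hm, List.replicate_add]
      simp [List.replicate]

theorem loopA_eq_emitB : ∀ l : List Char, pyLoopA l [] none 0 = emitB l
  | [] => by simp [pyLoopA, emitB, runsB]
  | c :: xs => by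
    simp only [pyLoopA]
    rw [if_neg (by simp : (none : Option Char) ≠ some c),
      if_pos (by norm_num : (1 : Nat) < 100), pyLoopA_acc, loopA_run, emitB_cons]
    have hm : min (1 + leadB c xs) 99 = 1 + min (leadB c xs) (99 - 1) := by omega
    rw [hm, List.replicate_add]
    simp [List.replicate]

-- ===== VERDICT (by name: the statement is the Claim_ definition above) =====
theorem prevent_character_spam_py_spec : Claim_equal_prevent_character_spam_py := by
  intro message _
  unfold Spec_prevent_character_spam_py prevent_character_spam_py prevent_character_spam_py_alt
  split
  · rfl
  · rw [loopA_eq_emitB]
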